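-- pv_equiv track=rewrite | github.com/thiagobelopasa/AuraBackTest | backend/services/mt5_report.py | _extract_pairs_from_row
-- ===== SOURCE A (Python) =====
-- def _extract_pairs_from_row(texts: list[str]) -> list[tuple[str, str]]:
--     """Percorre células de uma linha e emite pares (label_com_':', próximo_valor).
--
--     Suporta linhas tipo `[label1:, val1, label2:, val2, label3:, val3]`.
--     """
--     pairs: list[tuple[str, str]] = []
--     i = 0
--     while i < len(texts) - 1:
--         t = texts[i].strip()
--         if t.endswith(":") and len(t) > 1:
--             # próxima célula NÃO vazia
--             j = i + 1
--             while j < len(texts) and not texts[j].strip():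
--                 j += 1
--             if j < len(texts):
--                 label = t.rstrip(":").strip().lower()
--                 value = texts[j].strip()
--                 if label and value:
--                     pairs.append((label, value))
--                 i = j + 1
--                 continue
--         i += 1
--     return pairs
-- ===== SOURCE B (Python) =====
-- def _extract_pairs_from_row(texts: list[str]) -> list[tuple[str, str]]:
--     """One linear state-machine pass: a pending label waits for the next non-empty cell."""
--     pairs: list[tuple[str, str]] = []
--     pending = None  # None = no label awaiting its value ('' = label cell with empty label)
--     for cell in texts:
--         s = cell.strip()
--         if pending is not None:
--             if s:
--                 if pending:
--                     pairs.append((pending, s))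
--                 pending = None
--         elif s.endswith(":") and len(s) > 1:
--             pending = s.rstrip(":").strip().lower()
--     return pairs
-- ===== Notes on version B (the rewrite author's own statement) =====
-- stated objective: simpler
-- what changed: Replaced the index-based while-loop with an inner skip-scan and 'continue' by a single for-loop state machine that keeps one pending label and consumes the next non-empty cell as its value.
import Mathlib
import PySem

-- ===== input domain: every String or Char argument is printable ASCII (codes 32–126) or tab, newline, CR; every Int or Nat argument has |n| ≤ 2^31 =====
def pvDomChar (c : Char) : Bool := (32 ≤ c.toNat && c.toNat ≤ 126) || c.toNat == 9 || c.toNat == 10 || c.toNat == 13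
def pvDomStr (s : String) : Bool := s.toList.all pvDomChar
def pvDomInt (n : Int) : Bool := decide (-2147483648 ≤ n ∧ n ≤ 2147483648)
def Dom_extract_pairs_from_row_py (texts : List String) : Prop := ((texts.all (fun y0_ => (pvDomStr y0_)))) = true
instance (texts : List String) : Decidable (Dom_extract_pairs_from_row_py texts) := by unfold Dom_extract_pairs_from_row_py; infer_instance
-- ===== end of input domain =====

-- B replaces A's index/skip-scan while-loop by a single pass with a pending-label state (objective: simpler).

-- ===== PORT A =====
-- shared by both ports: both Pythons compute t.rstrip(":").strip().lower()
-- rstrip(":") ported by hand (exact: drops trailing ':' characters)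
def pvRstripColon (s : String) : String :=
  String.ofList ((s.toList.reverse.dropWhile (· == ':')).reverse)

def pvLabelOf (t : String) : String :=
  PySem.Str.lower (PySem.Str.strip (pvRstripColon t))

-- t.endswith(":") and len(t) > 1
def pvIsLabelCell (t : String) : Bool :=
  PySem.Str.endswith t ":" && decide (1 < PySem.Str.len t)

-- inner while: j advances while j < len(texts) and texts[j].strip() is empty
def pvScanJ (texts : List String) (j : Nat) : Nat :=
  if h : j < texts.length then
    if PySem.Str.strip texts[j] == "" then pvScanJ texts (j + 1) else j
  else j
termination_by texts.length - j
decreasing_by exact Nat.sub_succ_lt_self texts.length j h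

theorem pvScanJ_ge (texts : List String) (j : Nat) : j ≤ pvScanJ texts j := by
  unfold pvScanJ
  split
  · split
    · exact le_trans (Nat.le_succ j) (pvScanJ_ge texts (j + 1))
    · exact le_refl j
  · exact le_refl j
termination_by texts.length - j

-- outer while with index i and accumulator pairs
def pvGoA (texts : List String) (i : Nat) (pairs : List (String × String)) :
    List (String × String) :=
  if h : i + 1 < texts.length then
    if pvIsLabelCell (PySem.Str.strip texts[i]) then
      if hj : pvScanJ texts (i + 1) < texts.length then
        pvGoA texts (pvScanJ texts (i + 1) + 1)
          (if pvLabelOf (PySem.Str.strip texts[i]) ≠ "" ∧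
              PySem.Str.strip (texts[pvScanJ texts (i + 1)]'hj) ≠ "" then
            pairs ++ [(pvLabelOf (PySem.Str.strip texts[i]),
                       PySem.Str.strip (texts[pvScanJ texts (i + 1)]'hj))]
          else pairs)
      else pvGoA texts (i + 1) pairs
    else pvGoA texts (i + 1) pairs
  else pairs
termination_by texts.length - i
decreasing_by
  · exact Nat.sub_lt_sub_left (Nat.lt_of_succ_lt h) (Nat.lt_succ_of_lt (Nat.lt_of_succ_le (pvScanJ_ge texts (i + 1))))
  · exact Nat.sub_succ_lt_self texts.length i (Nat.lt_of_succ_lt h)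
  · exact Nat.sub_succ_lt_self texts.length i (Nat.lt_of_succ_lt h)

def extract_pairs_from_row_py (texts : List String) : List (String × String) :=
  pvGoA texts 0 []

-- ===== PORT B =====
-- state: (pairs so far, pending label; none = no label awaiting its value)
def pvStepB (st : List (String × String) × Option String) (cell : String) :
    List (String × String) × Option String :=
  match st.2 with
  | some lbl =>
      if PySem.Str.strip cell ≠ "" then
        (if lbl ≠ "" then st.1 ++ [(lbl, PySem.Str.strip cell)] else st.1, none)
      else st
  | none =>
      if pvIsLabelCell (PySem.Str.strip cell) then
        (st.1, some (pvLabelOf (PySem.Str.strip cell)))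
      else st

def extract_pairs_from_row_py_alt (texts : List String) : List (String × String) :=
  (texts.foldl pvStepB ([], none)).1

-- ===== PRECONDITION & SPEC =====
def Spec_extract_pairs_from_row_py (texts : List String) (out : List (String × String)) : Prop := out = extract_pairs_from_row_py_alt texts
instance (texts : List String) (out : List (String × String)) : Decidable (Spec_extract_pairs_from_row_py texts out) := by unfold Spec_extract_pairs_from_row_py; infer_instance

-- ===== CLAIM (what is proved, stated in full; the proofs are below) =====
def Claim_equal_extract_pairs_from_row_py : Prop := ∀ (texts : List String), Dom_extract_pairs_from_row_py texts → Spec_extract_pairs_from_row_py texts (extract_pairs_from_row_py texts)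

-- ===== LEMMAS AND PROOFS =====

-- suffix-based restatement of A's loop
def pvRunA (cells : List String) : List (String × String) :=
  match cells with
  | [] => []
  | [_] => []
  | c :: rest =>
    if pvIsLabelCell (PySem.Str.strip c) then
      if hw : (rest.dropWhile (fun x => PySem.Str.strip x == "")).isEmpty then []
      else
        (if pvLabelOf (PySem.Str.strip c) ≠ "" ∧
            PySem.Str.strip ((rest.dropWhile (fun x => PySem.Str.strip x == "")).headI) ≠ "" then
          [(pvLabelOf (PySem.Str.strip c),
            PySem.Str.strip ((rest.dropWhile (fun x => PySem.Str.strip x == "")).headI))]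
        else []) ++ pvRunA (rest.dropWhile (fun x => PySem.Str.strip x == "")).tail
    else pvRunA rest
termination_by cells.length
decreasing_by
  · have h1 := List.length_dropWhile_le (fun x => PySem.Str.strip x == "") rest
    have h2 : (rest.dropWhile (fun x => PySem.Str.strip x == "")).length ≠ 0 := by
      simpa [List.isEmpty_iff_length_eq_zero] using hw
    have h3 := List.length_tail (l := rest.dropWhile (fun x => PySem.Str.strip x == ""))
    simp at h1 h3 ⊢
    omega
  · simp

theorem pvRunA_nil : pvRunA [] = [] := by simp [pvRunA]

theorem pvRunA_single (c : String) : pvRunA [c] = [] := by simp [pvRunA]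

theorem pvRunA_cons₂_neg (c d : String) (rest : List String)
    (hlab : ¬ pvIsLabelCell (PySem.Str.strip c) = true) :
    pvRunA (c :: d :: rest) = pvRunA (d :: rest) := by
  rw [pvRunA]
  · rw [if_neg hlab]
  · simp

theorem pvRunA_cons₂_none (c d : String) (rest : List String)
    (hlab : pvIsLabelCell (PySem.Str.strip c) = true)
    (hd : (d :: rest).dropWhile (fun x => PySem.Str.strip x == "") = []) :
    pvRunA (c :: d :: rest) = [] := by
  rw [pvRunA]
  · rw [if_pos hlab, dif_pos (by simp [hd])]
  · simp

theorem pvRunA_cons₂_found (c d v : String) (rest cont : List String)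
    (hlab : pvIsLabelCell (PySem.Str.strip c) = true)
    (hd : (d :: rest).dropWhile (fun x => PySem.Str.strip x == "") = v :: cont) :
    pvRunA (c :: d :: rest) =
      (if pvLabelOf (PySem.Str.strip c) ≠ "" ∧ PySem.Str.strip v ≠ "" then
        [(pvLabelOf (PySem.Str.strip c), PySem.Str.strip v)]
      else []) ++ pvRunA cont := by
  rw [pvRunA]
  · rw [if_pos hlab, dif_neg (by simp [hd])]
    rw [hd]
    simp
  · simp

-- a suffix of all-whitespace cells produces nothing
theorem pvRunA_all_empty (l : List String)
    (h : ∀ x ∈ l, PySem.Str.strip x = "") : pvRunA l = [] := by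
  match l with
  | [] => exact pvRunA_nil
  | [c] => exact pvRunA_single c
  | c :: d :: rest =>
    rw [pvRunA_cons₂_neg]
    · exact pvRunA_all_empty (d :: rest) (fun x hx => h x (List.mem_cons_of_mem c hx))
    · rw [h c (by simp)]
      decide

-- scanJ reaches exactly the dropWhile point of the suffix
theorem pvScanJ_drop (texts : List String) (j : Nat) :
    texts.drop (pvScanJ texts j) =
      (texts.drop j).dropWhile (fun x => PySem.Str.strip x == "") := by
  unfold pvScanJ
  split
  · next h =>
    conv_rhs => rw [List.drop_eq_getElem_cons h]
    split
    · next he =>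
      rw [List.dropWhile_cons_of_pos (by simpa using he)]
      exact pvScanJ_drop texts (j + 1)
    · next he =>
      rw [List.dropWhile_cons_of_neg (by simpa using he)]
      exact List.drop_eq_getElem_cons h
  · next h =>
    rw [List.drop_eq_nil_of_le (by omega)]
    simp
termination_by texts.length - j

theorem pvGoA_runA_fuel (texts : List String) :
    ∀ (n i : Nat) (pairs : List (String × String)), texts.length ≤ i + n →
      pvGoA texts i pairs = pairs ++ pvRunA (texts.drop i) := by
  intro n
  induction n with
  | zero =>
    intro i pairs hn
    rw [pvGoA, dif_neg (by omega)]
    rw [List.drop_eq_nil_of_le (by omega), pvRunA_nil]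
    simp
  | succ n ih =>
    intro i pairs hn
    rw [pvGoA]
    split
    · next h =>
      have hdrop : texts.drop i = texts[i] :: texts.drop (i + 1) :=
        List.drop_eq_getElem_cons (by omega)
      cases hrest : texts.drop (i + 1) with
      | nil =>
        exfalso
        have := List.length_drop (l := texts) (i := i + 1)
        rw [hrest] at this
        simp at this
        omega
      | cons d rest =>
        have hscan := pvScanJ_drop texts (i + 1)
        rw [hrest] at hscan
        have hge := pvScanJ_ge texts (i + 1)
        split
        · next hlab =>
          split
          · next hj =>
            have hjdrop : texts.drop (pvScanJ texts (i + 1)) =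
                texts[pvScanJ texts (i + 1)] :: texts.drop (pvScanJ texts (i + 1) + 1) :=
              List.drop_eq_getElem_cons (by omega)
            rw [hjdrop] at hscan
            rw [ih (pvScanJ texts (i + 1) + 1) _ (by omega)]
            rw [hdrop, hrest, pvRunA_cons₂_found texts[i] d (texts[pvScanJ texts (i + 1)])
                  rest (texts.drop (pvScanJ texts (i + 1) + 1)) hlab hscan.symm]
            split_ifs with hcond
            · simp
            · simp
          · next hj =>
            have hempty : texts.drop (pvScanJ texts (i + 1)) = [] :=
              List.drop_eq_nil_of_le (by omega)
            rw [hempty] at hscan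
            rw [ih (i + 1) pairs (by omega)]
            rw [hdrop, hrest, pvRunA_cons₂_none texts[i] d rest hlab hscan.symm]
            rw [pvRunA_all_empty (d :: rest) ?_]
            have hall := List.dropWhile_eq_nil_iff.mp hscan.symm
            intro x hx
            simpa using hall x hx
        · next hlab =>
          rw [ih (i + 1) pairs (by omega)]
          rw [hdrop, hrest, pvRunA_cons₂_neg texts[i] d rest hlab]
    · next h =>
      match hd : texts.drop i with
      | [] => rw [pvRunA_nil]; simp
      | [c] => rw [pvRunA_single]; simp
      | a :: b :: rest =>
        exfalso
        have := List.length_drop (l := texts) (i := i)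
        rw [hd] at this
        simp at this
        omega

-- B's fold from a pending state: whitespace cells are skipped
theorem pvFoldB_pending_nil (cells : List String) (acc : List (String × String)) (lbl : String)
    (hd : cells.dropWhile (fun x => PySem.Str.strip x == "") = []) :
    cells.foldl pvStepB (acc, some lbl) = (acc, some lbl) := by
  induction cells generalizing acc with
  | nil => simp
  | cons c cs ih =>
    by_cases hc : PySem.Str.strip c = ""
    · rw [List.dropWhile_cons_of_pos (by simpa using hc)] at hd
      rw [List.foldl_cons]
      rw [show pvStepB (acc, some lbl) c = (acc, some lbl) from by simp [pvStepB, hc]]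
      exact ih acc hd
    · rw [List.dropWhile_cons_of_neg (by simpa using hc)] at hd
      cases hd

-- B's fold from a pending state consumes the first non-empty cell
theorem pvFoldB_pending_found (cells : List String) (acc : List (String × String)) (lbl v : String)
    (cont : List String)
    (hd : cells.dropWhile (fun x => PySem.Str.strip x == "") = v :: cont) :
    cells.foldl pvStepB (acc, some lbl) =
      cont.foldl pvStepB
        ((if lbl ≠ "" then acc ++ [(lbl, PySem.Str.strip v)] else acc), none) := by
  induction cells generalizing acc with
  | nil => cases hd
  | cons c cs ih =>
    by_cases hc : PySem.Str.strip c = ""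
    · rw [List.dropWhile_cons_of_pos (by simpa using hc)] at hd
      rw [List.foldl_cons]
      rw [show pvStepB (acc, some lbl) c = (acc, some lbl) from by simp [pvStepB, hc]]
      exact ih acc hd
    · rw [List.dropWhile_cons_of_neg (by simpa using hc)] at hd
      injection hd with h1 h2
      subst h1 h2
      rw [List.foldl_cons]
      rw [show pvStepB (acc, some lbl) c =
            ((if lbl ≠ "" then acc ++ [(lbl, PySem.Str.strip c)] else acc), none) from by
        simp [pvStepB, hc]]

-- main bridge: B's fold from a clean state computes pvRunA
set_option maxHeartbeats 1000000 in
theorem pvFoldB_runA_fuel :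
    ∀ (n : Nat) (cells : List String) (acc : List (String × String)), cells.length ≤ n →
      (cells.foldl pvStepB (acc, none)).1 = acc ++ pvRunA cells := by
  intro n
  induction n with
  | zero =>
    intro cells acc hn
    match cells with
    | [] => rw [pvRunA_nil]; simp
  | succ n ih =>
    intro cells acc hn
    match cells with
    | [] => rw [pvRunA_nil]; simp
    | [c] =>
      rw [pvRunA_single]
      simp only [List.foldl_cons, List.foldl_nil, List.append_nil]
      simp only [pvStepB]
      split <;> simp
    | c :: d :: rest =>
      by_cases hlab : pvIsLabelCell (PySem.Str.strip c) = true
      · simp only [List.foldl_cons]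
        rw [show pvStepB (acc, none) c = (acc, some (pvLabelOf (PySem.Str.strip c))) from by
          simp [pvStepB, hlab]]
        rw [show List.foldl pvStepB (pvStepB (acc, some (pvLabelOf (PySem.Str.strip c))) d) rest
              = (d :: rest).foldl pvStepB (acc, some (pvLabelOf (PySem.Str.strip c))) from by
          simp]
        cases heq : (d :: rest).dropWhile (fun x => PySem.Str.strip x == "") with
        | nil =>
          rw [pvFoldB_pending_nil (d :: rest) acc _ heq]
          rw [pvRunA_cons₂_none c d rest hlab heq]
          simp
        | cons v cont =>
          rw [pvFoldB_pending_found (d :: rest) acc _ v cont heq]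
          rw [pvRunA_cons₂_found c d v rest cont hlab heq]
          have hv : PySem.Str.strip v ≠ "" := by
            have h1 := List.head_dropWhile_not
              (p := fun x => PySem.Str.strip x == "") (l := d :: rest) (by simp [heq])
            simp only [heq, List.head_cons] at h1
            simpa using h1
          have hlen : cont.length < rest.length + 1 := by
            have h1 := List.length_dropWhile_le (fun x => PySem.Str.strip x == "") (d :: rest)
            rw [heq] at h1
            simp at h1
            omega
          rw [ih cont _ (by simp at hn; omega)]
          by_cases hl : pvLabelOf (PySem.Str.strip c) = ""
          · simp [hl, hv]
          · simp [hl, hv]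
      · rw [pvRunA_cons₂_neg c d rest hlab]
        rw [show (c :: d :: rest).foldl pvStepB (acc, none)
              = (d :: rest).foldl pvStepB (acc, none) from by
          rw [List.foldl_cons,
              show pvStepB (acc, none) c = (acc, none) from by simp [pvStepB, hlab]]]
        exact ih (d :: rest) acc (by simp at hn ⊢; omega)

-- ===== VERDICT (by name: the statement is the Claim_ definition above) =====
theorem extract_pairs_from_row_py_spec : Claim_equal_extract_pairs_from_row_py := by
  intro texts _
  unfold Spec_extract_pairs_from_row_py extract_pairs_from_row_py extract_pairs_from_row_py_alt
  rw [pvGoA_runA_fuel texts texts.length 0 [] (by omega), pvFoldB_runA_fuel texts.length texts [] (by omega)]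
  simp
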